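-- pv_equiv track=rewrite | github.com/TheEyeboy/functions | functions/my_functions.py | longest_shortest_string
-- ===== SOURCE A (Python) =====
-- def longest_shortest_string(strings):
--
--     if not strings:
--         return [], []
--
--     longest_string = []
--     shortest_string = []
--
--     #Initialize the longest and shortest name with the length the first string
--     longest_length = len(strings[0])
--     shortest_length = len(strings[0])
--
--     #Iterate or Loop over each string in the list
--     for string in strings:
--
--         #Update longest_length if the current string is longer
--         if len(string) > longest_length:
--             longest_length = len(string)
--             longest_string = [string]
--
--         #Add the list if they are equal
--         elif len(string) == longest_length:
--             longest_string.append(string)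
--
--         #Update shortest_length if the current string is shorter
--         if len(string) < shortest_length:
--             shortest_length = len(string)
--             shortest_string = [string]
--
--         #Add the list if they are equal
--         elif len(string) == shortest_length:
--             shortest_string.append(string)
--
--     return longest_string, shortest_string
-- ===== SOURCE B (Python) =====
-- def longest_shortest_string(strings):
--     if not strings:
--         return [], []
--     maxlen = max(len(s) for s in strings)
--     minlen = min(len(s) for s in strings)
--     return ([s for s in strings if len(s) == maxlen],
--             [s for s in strings if len(s) == minlen])
-- ===== Notes on version B (the rewrite author's own statement) =====
-- stated objective: simpler
-- what changed: Replaces A's single fused pass that maintains two running extreme lengths and mutates/resets two accumulator lists with a compute-extremes-then-filter decomposition: find maxlen and minlen first, then filter the list twice.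
import Mathlib
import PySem

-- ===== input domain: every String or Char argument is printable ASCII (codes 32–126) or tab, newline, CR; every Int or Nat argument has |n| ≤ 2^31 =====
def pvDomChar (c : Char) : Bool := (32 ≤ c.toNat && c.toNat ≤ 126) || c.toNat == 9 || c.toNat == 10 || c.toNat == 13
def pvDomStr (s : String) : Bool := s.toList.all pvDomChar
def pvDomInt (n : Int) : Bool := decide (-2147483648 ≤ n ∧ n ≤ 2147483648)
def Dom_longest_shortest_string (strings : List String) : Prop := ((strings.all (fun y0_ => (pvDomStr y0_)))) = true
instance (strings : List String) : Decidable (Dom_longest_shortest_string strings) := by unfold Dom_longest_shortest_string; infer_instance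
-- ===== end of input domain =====

-- B replaces A's fused accumulate-and-reset pass by compute-the-extreme-lengths-then-filter (simpler decomposition, same O(n)).

-- ===== PORT A =====
-- one loop step of A: updates ((longest_string, longest_length), (shortest_string, shortest_length))
def pvStepLong (st : List String × Int) (s : String) : List String × Int :=
  if PySem.Str.len s > st.2 then ([s], PySem.Str.len s)
  else if PySem.Str.len s == st.2 then (st.1 ++ [s], st.2)
  else st

def pvStepShort (st : List String × Int) (s : String) : List String × Int :=
  if PySem.Str.len s < st.2 then ([s], PySem.Str.len s)
  else if PySem.Str.len s == st.2 then (st.1 ++ [s], st.2)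
  else st

def longest_shortest_string (strings : List String) : List String × List String :=
  match strings with
  | [] => ([], [])
  | s0 :: _ =>
    let fin := strings.foldl
      (fun st s => (pvStepLong st.1 s, pvStepShort st.2 s))
      (([], PySem.Str.len s0), ([], PySem.Str.len s0))
    (fin.1.1, fin.2.1)

-- ===== PORT B =====
def longest_shortest_string_alt (strings : List String) : List String × List String :=
  match strings with
  | [] => ([], [])
  | s0 :: rest =>
    let maxlen := rest.foldl (fun a s => max a (PySem.Str.len s)) (PySem.Str.len s0)
    let minlen := rest.foldl (fun a s => min a (PySem.Str.len s)) (PySem.Str.len s0)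
    (strings.filter (fun s => PySem.Str.len s == maxlen),
     strings.filter (fun s => PySem.Str.len s == minlen))

-- ===== PRECONDITION & SPEC =====
def Spec_longest_shortest_string (strings : List String) (out : List String × List String) : Prop := out = longest_shortest_string_alt strings
instance (strings : List String) (out : List String × List String) : Decidable (Spec_longest_shortest_string strings out) := by unfold Spec_longest_shortest_string; infer_instance

-- ===== CLAIM (what is proved, stated in full; the proofs are below) =====
def Claim_equal_longest_shortest_string : Prop := ∀ (strings : List String), Dom_longest_shortest_string strings → Spec_longest_shortest_string strings (longest_shortest_string strings)

-- ===== LEMMAS AND PROOFS =====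

-- the combined fold is the pair of the two component folds
theorem pv_fold_pair (t : List String) (a b : List String × Int) :
    List.foldl (fun st s => (pvStepLong st.1 s, pvStepShort st.2 s)) (a, b) t
      = (List.foldl pvStepLong a t, List.foldl pvStepShort b t) := by
  induction t generalizing a b with
  | nil => rfl
  | cons s t ih => simp [List.foldl, ih]

-- invariant for the longest-side fold
theorem pv_loop_long (t : List String) : ∀ (pre : List String) (ml : Int),
    (∀ s ∈ pre, PySem.Str.len s ≤ ml) →
    List.foldl pvStepLong (pre.filter (fun s => PySem.Str.len s == ml), ml) t
      = ((pre ++ t).filter (fun s => PySem.Str.len s == t.foldl (fun a s => max a (PySem.Str.len s)) ml),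
         t.foldl (fun a s => max a (PySem.Str.len s)) ml) := by
  induction t with
  | nil => intro pre ml _; simp
  | cons s t ih =>
    intro pre ml hle
    have hstep : pvStepLong (pre.filter (fun s => PySem.Str.len s == ml), ml) s
        = ((pre ++ [s]).filter (fun x => PySem.Str.len x == (max ml (PySem.Str.len s))),
           max ml (PySem.Str.len s)) := by
      unfold pvStepLong
      by_cases hgt : PySem.Str.len s > ml
      · have hmax : max ml (PySem.Str.len s) = PySem.Str.len s := by omega
        have hpre : pre.filter (fun x => PySem.Str.len x == PySem.Str.len s) = [] := by
          rw [List.filter_eq_nil_iff]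
          intro x hx
          have := hle x hx
          simp only [beq_iff_eq]; omega
        simp at hgt hmax hpre
        simp [hgt, hmax, List.filter_append]
        exact hpre
      · have hmax : max ml (PySem.Str.len s) = ml := by omega
        by_cases heq : PySem.Str.len s = ml
        · simp at hgt heq hmax
          simp [heq, List.filter_append]
        · simp at hgt heq hmax
          simp [hgt, heq, List.filter_append]
    have hle' : ∀ x ∈ pre ++ [s], PySem.Str.len x ≤ max ml (PySem.Str.len s) := by
      intro x hx
      rcases List.mem_append.mp hx with h | h
      · have := hle x h; omega
      · simp at h; subst h; omega
    calc List.foldl pvStepLong (pre.filter (fun s => PySem.Str.len s == ml), ml) (s :: t)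
        = List.foldl pvStepLong ((pre ++ [s]).filter
            (fun x => PySem.Str.len x == max ml (PySem.Str.len s)), max ml (PySem.Str.len s)) t := by
          rw [List.foldl_cons, hstep]
      _ = _ := by
          rw [ih (pre ++ [s]) (max ml (PySem.Str.len s)) hle']
          simp [List.foldl]

-- invariant for the shortest-side fold (mirror image)
theorem pv_loop_short (t : List String) : ∀ (pre : List String) (sl : Int),
    (∀ s ∈ pre, sl ≤ PySem.Str.len s) →
    List.foldl pvStepShort (pre.filter (fun s => PySem.Str.len s == sl), sl) t
      = ((pre ++ t).filter (fun s => PySem.Str.len s == t.foldl (fun a s => min a (PySem.Str.len s)) sl),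
         t.foldl (fun a s => min a (PySem.Str.len s)) sl) := by
  induction t with
  | nil => intro pre sl _; simp
  | cons s t ih =>
    intro pre sl hle
    have hstep : pvStepShort (pre.filter (fun s => PySem.Str.len s == sl), sl) s
        = ((pre ++ [s]).filter (fun x => PySem.Str.len x == (min sl (PySem.Str.len s))),
           min sl (PySem.Str.len s)) := by
      unfold pvStepShort
      by_cases hlt : PySem.Str.len s < sl
      · have hmin : min sl (PySem.Str.len s) = PySem.Str.len s := by omega
        have hpre : pre.filter (fun x => PySem.Str.len x == PySem.Str.len s) = [] := by
          rw [List.filter_eq_nil_iff]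
          intro x hx
          have := hle x hx
          simp only [beq_iff_eq]; omega
        simp at hlt hmin hpre
        simp [hlt, hmin, List.filter_append]
        exact hpre
      · have hmin : min sl (PySem.Str.len s) = sl := by omega
        by_cases heq : PySem.Str.len s = sl
        · simp at hlt heq hmin
          simp [heq, List.filter_append]
        · have hne : ¬ (PySem.Str.len s == sl) = true := by simpa using heq
          rw [if_neg hlt, if_neg (by simpa using heq : ¬ (PySem.Str.len s == sl) = true)]
          simp_all [List.filter_append]
    have hle' : ∀ x ∈ pre ++ [s], min sl (PySem.Str.len s) ≤ PySem.Str.len x := by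
      intro x hx
      rcases List.mem_append.mp hx with h | h
      · have := hle x h; omega
      · simp at h; subst h; omega
    calc List.foldl pvStepShort (pre.filter (fun s => PySem.Str.len s == sl), sl) (s :: t)
        = List.foldl pvStepShort ((pre ++ [s]).filter
            (fun x => PySem.Str.len x == min sl (PySem.Str.len s)), min sl (PySem.Str.len s)) t := by
          rw [List.foldl_cons, hstep]
      _ = _ := by
          rw [ih (pre ++ [s]) (min sl (PySem.Str.len s)) hle']
          simp [List.foldl]

-- ===== VERDICT (by name: the statement is the Claim_ definition above) =====
theorem longest_shortest_string_spec : Claim_equal_longest_shortest_string := by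
  intro strings _
  unfold Spec_longest_shortest_string longest_shortest_string longest_shortest_string_alt
  match strings with
  | [] => rfl
  | s0 :: rest =>
    simp only
    rw [pv_fold_pair]
    have hlong := pv_loop_long (s0 :: rest) [] (PySem.Str.len s0) (by simp)
    have hshort := pv_loop_short (s0 :: rest) [] (PySem.Str.len s0) (by simp)
    simp only [List.filter_nil, List.nil_append] at hlong hshort
    rw [hlong, hshort]
    simp [List.foldl]
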